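-- pv_equiv track=rewrite | github.com/octos-org/harness-books | tools/assemble_synced_book.py | split_outline
-- ===== SOURCE A (Python) =====
-- def split_outline(text: str) -> tuple[str, list[tuple[str, str]]]:
--     lines = text.splitlines()
--     title: list[str] = []
--     sections: list[tuple[str, list[str]]] = []
--     current_heading: str | None = None
--     current_lines: list[str] = []
--
--     for line in lines:
--         if line.startswith("## "):
--             if current_heading is not None:
--                 sections.append((current_heading, current_lines))
--             current_heading = line[3:].strip()
--             current_lines = [line]
--         elif current_heading is None:
--             title.append(line)
--         else:
--             current_lines.append(line)
--
--     if current_heading is not None: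
--         sections.append((current_heading, current_lines))
--
--     return "\n".join(title).strip() + "\n", [(heading, "\n".join(body).strip() + "\n") for heading, body in sections]
-- ===== SOURCE B (Python) =====
-- def split_outline(text: str) -> tuple[str, list[tuple[str, str]]]:
--     lines = text.splitlines()
--     bounds = [i for i, line in enumerate(lines) if line.startswith("## ")]
--     title_lines = lines if not bounds else lines[:bounds[0]]
--     ends = bounds[1:] + [len(lines)]
--     sections = [
--         (lines[b][3:].strip(), "\n".join(lines[b:e]).strip() + "\n")
--         for b, e in zip(bounds, ends)
--     ]
--     return "\n".join(title_lines).strip() + "\n", sections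
-- ===== Notes on version B (the rewrite author's own statement) =====
-- stated objective: alternative
-- what changed: Replaces A's stateful accumulator loop (current_heading/current_lines with a final flush) by an index-based decomposition: collect the indices of all heading lines once, take the title as the prefix before the first index, and build each section by slicing between consecutive indices.
import Mathlib
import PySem

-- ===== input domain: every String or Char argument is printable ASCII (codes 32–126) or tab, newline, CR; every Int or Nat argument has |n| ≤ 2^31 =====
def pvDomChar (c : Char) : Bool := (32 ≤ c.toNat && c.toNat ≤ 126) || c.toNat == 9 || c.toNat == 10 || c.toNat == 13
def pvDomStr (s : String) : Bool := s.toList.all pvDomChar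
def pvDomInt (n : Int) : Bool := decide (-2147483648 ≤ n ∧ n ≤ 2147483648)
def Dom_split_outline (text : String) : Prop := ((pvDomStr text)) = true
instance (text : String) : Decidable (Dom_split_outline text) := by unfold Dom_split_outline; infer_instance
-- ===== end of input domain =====

-- B replaces A's stateful accumulator loop by a boundary-index-and-slice decomposition (objective: alternative).

-- ===== PORT A =====
-- loop body of A's for-loop, on the state (title, sections, current_heading, current_lines)
def stepA (st : List String × List (String × List String) × Option String × List String)
    (line : String) : List String × List (String × List String) × Option String × List String :=
  if PySem.Str.startswith line "## " then
    match st with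
    | (title, sections, some h, curL) =>
        (title, sections ++ [(h, curL)],
         some (PySem.Str.strip (PySem.Str.slice line (some 3) none)), [line])
    | (title, sections, none, _curL) =>
        (title, sections,
         some (PySem.Str.strip (PySem.Str.slice line (some 3) none)), [line])
  else
    match st with
    | (title, sections, none, curL) => (title ++ [line], sections, none, curL)
    | (title, sections, some h, curL) => (title, sections, some h, curL ++ [line])

def split_outline (text : String) : String × (List (String × String)) :=
  let lines := PySem.Str.splitlines text
  match lines.foldl stepA ([], [], none, []) with
  | (title, sections, curH, curL) =>
    let sections := match curH with
      | some h => sections ++ [(h, curL)]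
      | none => sections
    (PySem.Str.strip (PySem.Str.join "\n" title) ++ "\n",
     sections.map (fun hb => (hb.1, PySem.Str.strip (PySem.Str.join "\n" hb.2) ++ "\n")))

-- ===== PORT B =====
-- indices of all heading lines
def boundsB (lines : List String) : List Int :=
  (PySem.List.enumerate lines).filterMap
    (fun il => if PySem.Str.startswith il.2 "## " then some il.1 else none)

-- one section from a (start, end) index pair; be.1 is always a valid index of lines
def secB (lines : List String) (be : Int × Int) : String × String :=
  (PySem.Str.strip (PySem.Str.slice (PySem.List.pyGetD lines be.1 "") (some 3) none),
   PySem.Str.strip (PySem.Str.join "\n" (PySem.List.slice lines (some be.1) (some be.2))) ++ "\n")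

def split_outline_alt (text : String) : String × (List (String × String)) :=
  let lines := PySem.Str.splitlines text
  let bounds := boundsB lines
  let titleLines := match bounds with
    | [] => lines
    | b :: _ => PySem.List.slice lines none (some b)
  let ends := bounds.tail ++ [(lines.length : Int)]
  (PySem.Str.strip (PySem.Str.join "\n" titleLines) ++ "\n",
   (bounds.zip ends).map (secB lines))

-- ===== PRECONDITION & SPEC =====
def Spec_split_outline (text : String) (out : String × (List (String × String))) : Prop := out = split_outline_alt text
instance (text : String) (out : String × (List (String × String))) : Decidable (Spec_split_outline text out) := by unfold Spec_split_outline; infer_instance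

-- ===== CLAIM (what is proved, stated in full; the proofs are below) =====
def Claim_equal_split_outline : Prop := ∀ (text : String), Dom_split_outline text → Spec_split_outline text (split_outline text)

-- ===== LEMMAS AND PROOFS =====

-- qb l: l is NOT a heading line
def qb (l : String) : Bool := !(PySem.Str.startswith l "## ")

-- common normal form of the section structure: (heading, body lines) groups
def secsOf : List String → List (String × List String)
  | [] => []
  | l :: ls =>
      (PySem.Str.strip (PySem.Str.slice l (some 3) none), l :: ls.takeWhile qb)
        :: secsOf (ls.dropWhile qb)
termination_by ls => ls.length
decreasing_by
  simpa using Nat.lt_succ_of_le (ls.length_dropWhile_le qb)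

def renderSec (hb : String × List String) : String × String :=
  (hb.1, PySem.Str.strip (PySem.Str.join "\n" hb.2) ++ "\n")

@[simp] theorem secsOf_nil : secsOf [] = [] := by rw [secsOf]

theorem secsOf_cons (l : String) (ls : List String) :
    secsOf (l :: ls) =
      (PySem.Str.strip (PySem.Str.slice l (some 3) none), l :: ls.takeWhile qb)
        :: secsOf (ls.dropWhile qb) := by rw [secsOf]

-- flush the pending section, as A does after the loop
def finishA (st : List String × List (String × List String) × Option String × List String) :
    List String × List (String × List String) :=
  match st with
  | (t, secs, some h, cl) => (t, secs ++ [(h, cl)])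
  | (t, secs, none, _) => (t, secs)

theorem foldA_some (ls : List String) : ∀ (t : List String)
    (secs : List (String × List String)) (h : String) (cl : List String),
    finishA (ls.foldl stepA (t, secs, some h, cl)) =
      (t, secs ++ (h, cl ++ ls.takeWhile qb) :: secsOf (ls.dropWhile qb)) := by
  induction ls with
  | nil => intro t secs h cl; simp [finishA]
  | cons x xs ih =>
    intro t secs h cl
    by_cases hp : PySem.Chars.startswith x.toList ['#','#',' '] = true
    · simp [stepA, hp, ih, qb, secsOf_cons]
    · simp [stepA, hp, ih, qb]

theorem foldA_none (ls : List String) : ∀ (t : List String)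
    (secs : List (String × List String)) (cl : List String),
    finishA (ls.foldl stepA (t, secs, none, cl)) =
      (t ++ ls.takeWhile qb, secs ++ secsOf (ls.dropWhile qb)) := by
  induction ls with
  | nil => intro t secs cl; simp [finishA]
  | cons x xs ih =>
    intro t secs cl
    by_cases hp : PySem.Chars.startswith x.toList ['#','#',' '] = true
    · simp [stepA, hp, foldA_some, qb, secsOf_cons]
    · simp [stepA, hp, ih, qb]

theorem A_norm (text : String) :
    split_outline text =
      (PySem.Str.strip (PySem.Str.join "\n" ((PySem.Str.splitlines text).takeWhile qb)) ++ "\n",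
       (secsOf ((PySem.Str.splitlines text).dropWhile qb)).map renderSec) := by
  have h := foldA_none (PySem.Str.splitlines text) [] [] []
  simp only [split_outline]
  rcases hst : (PySem.Str.splitlines text).foldl stepA ([], [], none, []) with ⟨t, secs, curH, cl⟩
  rw [hst] at h
  cases curH <;> simp_all [finishA, renderSec]

-- B-side lemmas
theorem enumerate_shift {α : Type} (xs : List α) (s : Int) :
    PySem.List.enumerate xs (s + 1) =
      (PySem.List.enumerate xs s).map (fun q => (q.1 + 1, q.2)) := by
  induction xs generalizing s with
  | nil => simp [PySem.List.enumerate_nil]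
  | cons x xs ih =>
    simp [PySem.List.enumerate_cons, ih]

theorem boundsB_cons (l : String) (ls : List String) :
    boundsB (l :: ls) =
      if PySem.Chars.startswith l.toList ['#','#',' '] then 0 :: (boundsB ls).map (· + 1)
      else (boundsB ls).map (· + 1) := by
  simp only [boundsB, PySem.List.enumerate_cons]
  rw [show (0 : Int) + 1 = 0 + 1 by ring, enumerate_shift]
  by_cases hp : PySem.Chars.startswith l.toList ['#','#',' '] = true
  · simp [hp, List.filterMap_map, List.map_filterMap, apply_ite]
  · simp [hp, List.filterMap_map, List.map_filterMap, apply_ite]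

theorem boundsB_nonneg (ls : List String) : ∀ x ∈ boundsB ls, 0 ≤ x := by
  induction ls with
  | nil => simp [boundsB, PySem.List.enumerate_nil]
  | cons l ls ih =>
    rw [boundsB_cons]
    split_ifs <;> intro x hx <;> simp at hx
    · rcases hx with h0 | ⟨y, hy, rfl⟩
      · omega
      · have := ih y hy; omega
    · rcases hx with ⟨y, hy, rfl⟩; have := ih y hy; omega

theorem firstBound (ls : List String) :
    (match boundsB ls with
     | [] => (ls.length : Int)
     | i :: _ => i) = ((ls.takeWhile qb).length : Int) := by
  induction ls with
  | nil => simp [boundsB, PySem.List.enumerate_nil]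
  | cons l ls ih =>
    rw [boundsB_cons]
    by_cases hp : PySem.Chars.startswith l.toList ['#','#',' '] = true
    · simp [hp, qb]
    · rw [if_neg hp]
      cases hb : boundsB ls with
      | nil =>
        rw [hb] at ih; simp at ih
        simp [qb, hp, ← ih]
      | cons i rest =>
        rw [hb] at ih; simp at ih
        simp [qb, hp, ih]

theorem takeWhile_of_bounds_nil {ls : List String} (h : boundsB ls = []) :
    ls.takeWhile qb = ls := by
  have := firstBound ls
  rw [h] at this; simp at this
  exact (List.takeWhile_prefix qb).eq_of_length (by omega)

theorem take_firstBound {ls : List String} {i : Int} {rest : List Int}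
    (h : boundsB ls = i :: rest) : ls.take i.toNat = ls.takeWhile qb := by
  have hf := firstBound ls
  rw [h] at hf; simp at hf
  subst hf
  simp
  exact ((List.prefix_iff_eq_take.mp (List.takeWhile_prefix qb))).symm

theorem shift_secB (l : String) (ls : List String) (i j : Int) (hi : 0 ≤ i) (hj : 0 ≤ j) :
    secB (l :: ls) (i + 1, j + 1) = secB ls (i, j) := by
  have hi1 : (i + 1).toNat = i.toNat + 1 := by omega
  have hj1 : (j + 1).toNat = j.toNat + 1 := by omega
  simp only [secB]
  rw [PySem.List.slice_toNat _ (by omega) (by omega),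
      PySem.List.slice_toNat _ hi hj, hi1, hj1]
  have hg : PySem.List.pyGetD (l :: ls) (i + 1) "" = PySem.List.pyGetD ls i "" := by
    rw [show i + 1 = ((i.toNat + 1 : Nat) : Int) by omega, PySem.List.pyGetD_natCast,
        show i = ((i.toNat : Nat) : Int) by omega, PySem.List.pyGetD_natCast]
    simp [max_eq_left hi]
  rw [hg]
  simp [Nat.add_sub_add_right]

set_option maxHeartbeats 1600000 in
theorem B_secs (lines : List String) :
    ((boundsB lines).zip ((boundsB lines).tail ++ [(lines.length : Int)])).map (secB lines)
      = (secsOf (lines.dropWhile qb)).map renderSec := by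
  induction lines with
  | nil => simp [boundsB, PySem.List.enumerate_nil]
  | cons l ls ih =>
    rw [boundsB_cons]
    by_cases hp : PySem.Chars.startswith l.toList ['#','#',' '] = true
    · rw [if_pos hp]
      have hqb : qb l = false := by simp [qb, hp]
      have hdrop : (l :: ls).dropWhile qb = l :: ls := by simp [hqb]
      rw [hdrop, secsOf_cons]
      have hgl : PySem.List.pyGetD (l :: ls) 0 "" = l := by
        rw [show (0 : Int) = ((0 : Nat) : Int) by norm_num, PySem.List.pyGetD_natCast]
        rfl
      cases hb : boundsB ls with
      | nil =>
        have htw := takeWhile_of_bounds_nil hb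
        have hdrop2 : ls.dropWhile qb = [] := by
          have h0 := List.takeWhile_append_dropWhile (p := qb) (l := ls)
          rw [htw] at h0
          simpa using h0
        rw [hdrop2, htw]
        simp only [List.map_nil, List.tail_cons, List.nil_append, List.zip_cons_cons,
          List.zip_nil_left, List.map_cons, List.map_nil, secsOf_nil, secB, renderSec]
        rw [List.cons_eq_cons, Prod.mk.injEq]
        refine ⟨⟨?_, ?_⟩, rfl⟩
        · rw [hgl]
        · congr 2
          rw [PySem.List.slice_toNat _ le_rfl (by omega)]
          simp only [Int.toNat_zero, List.drop_zero, Nat.sub_zero]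
          rw [show ((l :: ls).length : Int).toNat = ls.length + 1 by simp, List.take_succ_cons,
            List.take_length]
      | cons i rest =>
        have hi0 : 0 ≤ i := boundsB_nonneg ls i (by rw [hb]; simp)
        simp only [List.map_cons, List.tail_cons, List.cons_append, List.zip_cons_cons]
        rw [List.cons_eq_cons]
        refine ⟨?_, ?_⟩
        · -- head section: slice lines[0 : i+1] = l :: takeWhile qb ls
          simp only [secB, renderSec, Prod.mk.injEq]
          refine ⟨?_, ?_⟩
          · rw [hgl]
          · congr 2
            rw [PySem.List.slice_toNat _ le_rfl (by omega)]
            simp only [Int.toNat_zero, List.drop_zero, Nat.sub_zero]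
            rw [show (i + 1).toNat = i.toNat + 1 by omega, List.take_succ_cons,
              take_firstBound hb]
        · -- remaining sections: the shifted zip of ls's bounds
          have hn : ((l :: ls).length : Int) = (ls.length : Int) + 1 := by simp
          rw [hn]
          have hz : (List.map (· + 1) rest) ++ [(ls.length : Int) + 1]
              = List.map (· + 1) (rest ++ [(ls.length : Int)]) := by simp
          rw [show (i + 1) :: List.map (· + 1) rest = List.map (· + 1) (i :: rest) by simp]
          rw [hz, List.zip_map, List.map_map]
          rw [← ih, hb, List.tail_cons]
          apply List.map_congr_left
          intro be hbe
          have h1 : be.1 ∈ i :: rest := (List.of_mem_zip hbe).1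
          have h2 : be.2 ∈ rest ++ [(ls.length : Int)] := (List.of_mem_zip hbe).2
          have hb1 : 0 ≤ be.1 := boundsB_nonneg ls be.1 (by rw [hb]; exact h1)
          have hb2 : 0 ≤ be.2 := by
            rcases List.mem_append.mp h2 with h2 | h2
            · exact boundsB_nonneg ls be.2 (by rw [hb]; exact List.mem_cons_of_mem i h2)
            · simp at h2; omega
          simpa using shift_secB l ls be.1 be.2 hb1 hb2
    · rw [if_neg hp]
      have hqb : qb l = true := by simp [qb, hp]
      have hdrop : (l :: ls).dropWhile qb = ls.dropWhile qb := by simp [hqb]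
      rw [hdrop, ← ih]
      have hn : ((l :: ls).length : Int) = (ls.length : Int) + 1 := by simp
      rw [hn]
      have hz : ((boundsB ls).map (· + 1)).tail ++ [(ls.length : Int) + 1]
          = ((boundsB ls).tail ++ [(ls.length : Int)]).map (· + 1) := by simp [List.map_tail]
      rw [hz, List.zip_map, List.map_map]
      apply List.map_congr_left
      intro be hbe
      have h1 : be.1 ∈ boundsB ls := (List.of_mem_zip hbe).1
      have h2 : be.2 ∈ (boundsB ls).tail ++ [(ls.length : Int)] := (List.of_mem_zip hbe).2
      have hb1 : 0 ≤ be.1 := boundsB_nonneg ls be.1 h1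
      have hb2 : 0 ≤ be.2 := by
        rcases List.mem_append.mp h2 with h2 | h2
        · exact boundsB_nonneg ls be.2 (List.mem_of_mem_tail h2)
        · simp at h2; omega
      simpa using shift_secB l ls be.1 be.2 hb1 hb2

theorem B_title (lines : List String) :
    (match boundsB lines with
     | [] => lines
     | b :: _ => PySem.List.slice lines none (some b)) = lines.takeWhile qb := by
  cases hb : boundsB lines with
  | nil => exact (takeWhile_of_bounds_nil hb).symm
  | cons i rest =>
    have hi0 : 0 ≤ i := boundsB_nonneg lines i (by rw [hb]; simp)
    simp only
    rw [PySem.List.slice_to _ hi0]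
    exact take_firstBound hb

theorem B_norm (text : String) :
    split_outline_alt text =
      (PySem.Str.strip (PySem.Str.join "\n" ((PySem.Str.splitlines text).takeWhile qb)) ++ "\n",
       (secsOf ((PySem.Str.splitlines text).dropWhile qb)).map renderSec) := by
  simp only [split_outline_alt]
  rw [B_title, B_secs]

-- ===== VERDICT (by name: the statement is the Claim_ definition above) =====
theorem split_outline_spec : Claim_equal_split_outline := by
  intro text _
  unfold Spec_split_outline
  rw [A_norm, B_norm]
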